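-- pv_equiv track=rewrite | github.com/chang2eee/Coding-Test | 프로그래머스/1/12930. 이상한 문자 만들기/이상한 문자 만들기.py | solution
-- ===== SOURCE A (Python) =====
-- def solution(s):
--     answer = ''
--
--     s = s.split(' ')
--
--     for element in s:
--         for i in range(len(element)):
--             if i % 2 == 0:
--                 answer += element[i].upper()
--             else:
--                 answer += element[i].lower()
--
--         answer += ' '
--
--     answer = answer[:len(answer)-1]
--
--     return answer
-- ===== SOURCE B (Python) =====
-- def solution(s):
--     out = []
--     i = 0
--     for ch in s:
--         if ch == ' ':
--             out.append(' ')
--             i = 0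
--         else:
--             out.append(ch.upper() if i % 2 == 0 else ch.lower())
--             i += 1
--     return ''.join(out)
-- ===== Notes on version B (the rewrite author's own statement) =====
-- stated objective: simpler
-- what changed: Replaced split-on-space / per-word index loops / join-with-trailing-space-then-slice by a single left-to-right scan with a position counter that resets to 0 at every space.
import Mathlib
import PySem

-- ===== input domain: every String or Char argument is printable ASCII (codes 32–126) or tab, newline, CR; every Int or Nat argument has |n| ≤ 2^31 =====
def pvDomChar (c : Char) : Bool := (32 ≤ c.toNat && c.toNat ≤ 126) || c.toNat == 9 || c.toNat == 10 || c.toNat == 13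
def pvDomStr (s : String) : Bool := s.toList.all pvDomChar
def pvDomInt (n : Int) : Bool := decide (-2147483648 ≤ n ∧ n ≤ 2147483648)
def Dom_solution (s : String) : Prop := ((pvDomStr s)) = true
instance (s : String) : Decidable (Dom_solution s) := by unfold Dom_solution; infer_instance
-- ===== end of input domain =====

-- B replaces A's split-on-space / per-word index loops / join-with-trailing-space-then-slice
-- by a single left-to-right scan whose position counter resets to 0 at each space (same O(n) cost, simpler).

-- ===== PORT A =====
-- literal transliteration of A: split on ' ', per word loop over range(len(element)) appending
-- upper at even / lower at odd index, append ' ' after each word, finally answer[:len(answer)-1]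
def solution (s : String) : String :=
  let parts := PySem.Chars.splitOn s.toList [' ']
  let answer := parts.foldl (fun acc elem =>
    (PySem.List.pyRange 0 (PySem.List.len elem)).foldl
      (fun a i =>
        if PySem.Int.mod i 2 == 0 then
          a ++ [PySem.Chars.upperChar (PySem.List.pyGetD elem i ' ')]
        else
          a ++ [PySem.Chars.lowerChar (PySem.List.pyGetD elem i ' ')]) acc
    ++ [' ']) []
  String.mk (PySem.List.slice answer none (some (PySem.List.len answer - 1)))

-- ===== PORT B =====
-- literal transliteration of B: one pass over the characters with accumulator (output, index)
def solution_alt (s : String) : String :=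
  let r := s.toList.foldl
    (fun (st : List Char × Int) ch =>
      if ch = ' ' then (st.1 ++ [' '], 0)
      else (st.1 ++ [if PySem.Int.mod st.2 2 == 0 then PySem.Chars.upperChar ch
                     else PySem.Chars.lowerChar ch], st.2 + 1))
    ([], 0)
  String.mk r.1

-- ===== PRECONDITION & SPEC =====
def Spec_solution (s : String) (out : String) : Prop := out = solution_alt s
instance (s : String) (out : String) : Decidable (Spec_solution s out) := by unfold Spec_solution; infer_instance

-- ===== CLAIM (what is proved, stated in full; the proofs are below) =====
def Claim_equal_solution : Prop := ∀ (s : String), Dom_solution s → Spec_solution s (solution s)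

-- ===== LEMMAS AND PROOFS =====

-- alternating-case of one character at position i
def pvCase (i : Int) (c : Char) : Char :=
  if PySem.Int.mod i 2 == 0 then PySem.Chars.upperChar c else PySem.Chars.lowerChar c

-- alternating-case of a whole word starting at index i (what A's inner loop produces)
def pvAw : List Char → Int → List Char
  | [], _ => []
  | c :: cs, i => pvCase i c :: pvAw cs (i + 1)

-- B's scan, purely: a space emits ' ' and resets the counter
def pvG : List Char → Int → List Char
  | [], _ => []
  | c :: cs, i => if c = ' ' then ' ' :: pvG cs 0 else pvCase i c :: pvG cs (i + 1)

-- structural version of split(' ')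
def pvSplitSp : List Char → List (List Char)
  | [] => [[]]
  | c :: cs => if c = ' ' then [] :: pvSplitSp cs
               else (c :: (pvSplitSp cs).headI) :: (pvSplitSp cs).tail

theorem pvSplitSp_ne_nil (cs : List Char) : pvSplitSp cs ≠ [] := by
  cases cs with
  | nil => simp [pvSplitSp]
  | cons c cs => unfold pvSplitSp; split <;> simp

theorem pvGo_spec (fuel : Nat) (l : List Char) (h : l.length ≤ fuel)
    (cur : List Char) (acc : List (List Char)) :
    PySem.Chars.splitOn.go [' '] fuel l cur acc
      = acc.reverse ++ (pvSplitSp l).modifyHead (cur.reverse ++ ·) := by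
  induction fuel generalizing l cur acc with
  | zero =>
    have : l = [] := by cases l <;> simp_all
    subst this
    simp [PySem.Chars.splitOn.go, pvSplitSp]
  | succ fuel ih =>
    cases l with
    | nil => simp [PySem.Chars.splitOn.go, pvSplitSp]
    | cons c rest =>
      rw [PySem.Chars.splitOn.go]
      by_cases hc : c = ' '
      · subst hc
        have hp : [' '].isPrefixOf (' ' :: rest) = true := by simp [List.isPrefixOf]
        rw [if_pos hp]
        simp only [List.length_singleton, List.drop_one, List.tail_cons]
        rw [ih rest (by simpa using Nat.le_of_succ_le_succ (by simpa using h)) [] (cur.reverse :: acc)]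
        obtain ⟨h', t', hsp⟩ := List.exists_cons_of_ne_nil (pvSplitSp_ne_nil rest)
        simp [pvSplitSp, hsp]
      · have hp : [' '].isPrefixOf (c :: rest) = false := by
          simp [List.isPrefixOf]; exact fun hh => (hc hh.symm).elim
        rw [if_neg (by simp [hp])]
        rw [ih rest (by simpa using Nat.le_of_succ_le_succ (by simpa using h)) (c :: cur) acc]
        obtain ⟨h', t', hsp⟩ := List.exists_cons_of_ne_nil (pvSplitSp_ne_nil rest)
        simp [pvSplitSp, hsp, hc]

theorem pvSplitOn_eq (cs : List Char) : PySem.Chars.splitOn cs [' '] = pvSplitSp cs := by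
  rw [PySem.Chars.splitOn, pvGo_spec (cs.length + 1) cs (by omega) [] []]
  obtain ⟨h', t', hsp⟩ := List.exists_cons_of_ne_nil (pvSplitSp_ne_nil cs)
  simp [hsp]

theorem pvAw_append (u v : List Char) (i : Int) :
    pvAw (u ++ v) i = pvAw u i ++ pvAw v (i + u.length) := by
  induction u generalizing i with
  | nil => simp [pvAw]
  | cons c u ih =>
    simp only [List.cons_append, pvAw, ih, List.length_cons]
    push_cast
    ring_nf

-- A's inner loop over range(len(w)) produces pvAw w 0
theorem pvInner (w : List Char) (acc : List Char) :
    (PySem.List.pyRange 0 (PySem.List.len w)).foldl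
      (fun a i =>
        if PySem.Int.mod i 2 == 0 then
          a ++ [PySem.Chars.upperChar (PySem.List.pyGetD w i ' ')]
        else
          a ++ [PySem.Chars.lowerChar (PySem.List.pyGetD w i ' ')]) acc
      = acc ++ pvAw w 0 := by
  have key : ∀ (w : List Char),
      (PySem.List.pyRange 0 (w.length : Int)).map
        (fun i => pvCase i (PySem.List.pyGetD w i ' ')) = pvAw w 0 := by
    intro w
    induction w using List.reverseRecOn with
    | nil => simp [PySem.List.pyRange, pvAw]
    | append_singleton u c ih =>
      rw [List.length_append, List.length_singleton]
      push_cast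
      rw [PySem.List.pyRange_one_succ_right (by positivity)]
      rw [List.map_append]
      rw [List.map_congr_left (l := PySem.List.pyRange 0 (u.length : Int))
        (g := fun i => pvCase i (PySem.List.pyGetD u i ' ')) ?_]
      · rw [ih, pvAw_append]
        simp only [List.map_singleton]
        congr 1
        simp [pvAw, PySem.List.pyGetD_natCast]
      · intro i hi
        have := PySem.List.mem_pyRange_one.mp hi
        have h0 : 0 ≤ i := this.1
        have h1 : i < u.length := this.2
        congr 1
        rw [PySem.List.pyGetD_of_nonneg _ _ h0, PySem.List.pyGetD_of_nonneg _ _ h0]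
        rw [List.getD_append]
        omega
  have hfun : (fun (a : List Char) (i : Int) =>
        if PySem.Int.mod i 2 == 0 then
          a ++ [PySem.Chars.upperChar (PySem.List.pyGetD w i ' ')]
        else
          a ++ [PySem.Chars.lowerChar (PySem.List.pyGetD w i ' ')])
      = (fun a i => a ++ [pvCase i (PySem.List.pyGetD w i ' ')]) := by
    funext a i
    unfold pvCase
    split <;> rfl
  rw [hfun, PySem.List.foldl_append_singleton_eq_map, PySem.List.len_eq, key]

-- the bridge between A's join-everything-then-dropLast and B's scan, generalized over the index
theorem pvBridge (cs : List Char) (i : Int) :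
    (pvAw (pvSplitSp cs).headI i ++ ' ' ::
      ((pvSplitSp cs).tail.flatMap (fun w => pvAw w 0 ++ [' ']))).dropLast = pvG cs i := by
  induction cs generalizing i with
  | nil => simp [pvSplitSp, pvAw, pvG]
  | cons c cs ih =>
    obtain ⟨h', t', hsp⟩ := List.exists_cons_of_ne_nil (pvSplitSp_ne_nil cs)
    by_cases hc : c = ' '
    · subst hc
      have e1 : pvSplitSp (' ' :: cs) = [] :: pvSplitSp cs := by simp [pvSplitSp]
      have e2 : pvG (' ' :: cs) i = ' ' :: pvG cs 0 := by rw [pvG]; simp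
      rw [e1, e2, ← ih 0, hsp]
      simp only [List.headI_cons, List.tail_cons, pvAw, List.nil_append, List.flatMap_cons]
      rw [List.dropLast_cons_of_ne_nil (by simp), List.append_assoc]
      simp
    · have e1 : pvSplitSp (c :: cs) = (c :: (pvSplitSp cs).headI) :: (pvSplitSp cs).tail := by
        simp [pvSplitSp, hc]
      have e2 : pvG (c :: cs) i = pvCase i c :: pvG cs (i + 1) := by rw [pvG]; simp [hc]
      rw [e1, e2, ← ih (i + 1)]
      simp only [List.headI_cons, List.tail_cons, pvAw, List.cons_append]
      rw [List.dropLast_cons_of_ne_nil (by simp)]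

-- B's fold carries (output so far, index); its first component appends pvG
theorem pvB_fold (cs : List Char) (out : List Char) (i : Int) :
    (cs.foldl
      (fun (st : List Char × Int) ch =>
        if ch = ' ' then (st.1 ++ [' '], 0)
        else (st.1 ++ [if PySem.Int.mod st.2 2 == 0 then PySem.Chars.upperChar ch
                       else PySem.Chars.lowerChar ch], st.2 + 1))
      (out, i)).1 = out ++ pvG cs i := by
  induction cs generalizing out i with
  | nil => simp [pvG]
  | cons c cs ih =>
    by_cases hc : c = ' '
    · subst hc
      simp only [List.foldl_cons, if_true, reduceIte]
      rw [ih, pvG]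
      simp
    · simp only [List.foldl_cons, if_neg hc, ih]
      rw [pvG]
      simp only [if_neg hc, pvCase]
      simp

-- A's outer fold is a flatMap over the words
theorem pvA_outer (parts : List (List Char)) :
    parts.foldl (fun acc elem =>
      (PySem.List.pyRange 0 (PySem.List.len elem)).foldl
        (fun a i =>
          if PySem.Int.mod i 2 == 0 then
            a ++ [PySem.Chars.upperChar (PySem.List.pyGetD elem i ' ')]
          else
            a ++ [PySem.Chars.lowerChar (PySem.List.pyGetD elem i ' ')]) acc
      ++ [' ']) []
      = parts.flatMap (fun w => pvAw w 0 ++ [' ']) := by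
  have hfun : (fun (acc : List Char) (elem : List Char) =>
      (PySem.List.pyRange 0 (PySem.List.len elem)).foldl
        (fun a i =>
          if PySem.Int.mod i 2 == 0 then
            a ++ [PySem.Chars.upperChar (PySem.List.pyGetD elem i ' ')]
          else
            a ++ [PySem.Chars.lowerChar (PySem.List.pyGetD elem i ' ')]) acc
      ++ [' '])
      = (fun acc w => acc ++ (pvAw w 0 ++ [' '])) := by
    funext acc w
    rw [pvInner]
    simp
  rw [hfun, PySem.List.foldl_append_eq_flatMap]
  simp

-- ===== VERDICT (by name: the statement is the Claim_ definition above) =====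
theorem solution_spec : Claim_equal_solution := by
  unfold Claim_equal_solution
  intro s _
  unfold Spec_solution solution solution_alt
  dsimp only
  rw [pvSplitOn_eq, pvA_outer, pvB_fold]
  obtain ⟨h', t', hsp⟩ := List.exists_cons_of_ne_nil (pvSplitSp_ne_nil s.toList)
  set answer := (pvSplitSp s.toList).flatMap (fun w => pvAw w 0 ++ [' ']) with hans
  have hlen : 1 ≤ answer.length := by
    rw [hans, hsp]
    simp [List.flatMap_cons]
    omega
  rw [PySem.List.len_eq, PySem.List.slice_to _ (by omega)]
  have htoNat : ((answer.length : Int) - 1).toNat = answer.length - 1 := by omega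
  rw [htoNat, ← List.dropLast_eq_take]
  have : answer.dropLast = pvG s.toList 0 := by
    rw [hans, hsp, List.flatMap_cons, List.append_assoc, List.singleton_append,
      ← pvBridge s.toList 0, hsp]
    simp
  rw [this]
  simp
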